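-- pv_equiv track=rewrite | github.com/GooLey1025/CEN_Tools | scripts/06.HOR/HORdetect.py | genCycleflag
-- ===== SOURCE A (Python) =====
-- def genCycleflag(cl, seq):
--     clstr = "".join(cl)[:-1] # input cycle without the head to tail
--     clstr_rotate = [clstr[i:] + clstr[:i] for i in range(len(clstr))]
--     for iclstr in clstr_rotate:
--         if seq.count(iclstr) >= 2:
--             return  False
--     else:
--         return True
-- ===== SOURCE B (Python) =====
-- def genCycleflag(cl, seq):
--     clstr = "".join(cl)[:-1]
--     L = len(clstr)
--     if L == 0:
--         return True
--     d = clstr + clstr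
--     rotset = set(d[i:i+L] for i in range(L))
--     first = {}
--     for p in range(len(seq) - L + 1):
--         w = seq[p:p+L]
--         if w in rotset:
--             f = first.get(w)
--             if f is None:
--                 first[w] = p
--             elif p - f >= L:
--                 return False
--     return True
-- ===== Notes on version B (the rewrite author's own statement) =====
-- stated objective: alternative
-- what changed: Instead of counting each rotation in seq (rotation-major, one full count per rotation), B scans seq once window by window: it builds the set of rotations from the doubled string, then walks every length-L window of seq, remembering in a dict the first position of each window that is a rotation, and returns False as soon as the same rotation recurs at distance >= L (which is exactly when Python's non-overlapping count reaches 2, since the stored position is the minimal occurrence).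
import Mathlib
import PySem

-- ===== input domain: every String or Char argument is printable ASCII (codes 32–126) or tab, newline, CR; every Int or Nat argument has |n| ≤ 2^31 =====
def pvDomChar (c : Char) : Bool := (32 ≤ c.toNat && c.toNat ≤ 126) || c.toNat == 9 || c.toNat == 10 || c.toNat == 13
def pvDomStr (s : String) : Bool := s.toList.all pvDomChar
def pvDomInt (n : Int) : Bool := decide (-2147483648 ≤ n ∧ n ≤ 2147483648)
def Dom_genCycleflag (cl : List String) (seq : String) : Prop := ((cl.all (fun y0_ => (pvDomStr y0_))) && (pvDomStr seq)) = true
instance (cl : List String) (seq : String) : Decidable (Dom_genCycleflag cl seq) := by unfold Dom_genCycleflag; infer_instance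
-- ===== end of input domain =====

-- B replaces A's rotation-major counting (one full str.count per rotation) by a single
-- window-major scan of seq that remembers in a dict the first position of each window
-- belonging to the rotation set (objective: alternative algorithm, same results).

-- ===== PORT A =====
-- the for-loop over clstr_rotate with its early 'return False' and trailing 'return True'
def genCycleflagLoop (seq : String) : List String → Bool
  | [] => true
  | r :: rest => if 2 ≤ PySem.Str.count seq r then false else genCycleflagLoop seq rest

def genCycleflag (cl : List String) (seq : String) : Bool :=
  let clstr := PySem.Str.slice (PySem.Str.join "" cl) none (some (-1))
  let clstr_rotate := (PySem.List.pyRange 0 (PySem.Str.len clstr) 1).map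
      (fun i => PySem.Str.slice clstr (some i) none ++ PySem.Str.slice clstr none (some i))
  genCycleflagLoop seq clstr_rotate

-- ===== PORT B =====
-- the for-loop over range(len(seq)-L+1) carrying the dict 'first' of first window positions
def genCycleflagAltLoop (seq : String) (L : Int) (rotset : PySem.Set String) :
    List Int → PySem.Dict String Int → Bool
  | [], _ => true
  | p :: rest, first =>
    let w := PySem.Str.slice seq (some p) (some (p + L))
    if PySem.Set.contains rotset w then
      match first.get? w with
      | none => genCycleflagAltLoop seq L rotset rest (first.insert w p)
      | some f => if L ≤ p - f then false else genCycleflagAltLoop seq L rotset rest first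
    else genCycleflagAltLoop seq L rotset rest first

def genCycleflag_alt (cl : List String) (seq : String) : Bool :=
  let clstr := PySem.Str.slice (PySem.Str.join "" cl) none (some (-1))
  let L := PySem.Str.len clstr
  if L = 0 then true
  else
    let d := clstr ++ clstr
    let rotset := PySem.Set.ofList ((PySem.List.pyRange 0 L 1).map
        (fun i => PySem.Str.slice d (some i) (some (i + L))))
    genCycleflagAltLoop seq L rotset (PySem.List.pyRange 0 (PySem.Str.len seq - L + 1) 1)
      PySem.Dict.empty

-- ===== PRECONDITION & SPEC =====
def Spec_genCycleflag (cl : List String) (seq : String) (out : Bool) : Prop := out = genCycleflag_alt cl seq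
instance (cl : List String) (seq : String) (out : Bool) : Decidable (Spec_genCycleflag cl seq out) := by unfold Spec_genCycleflag; infer_instance

-- ===== CLAIM (what is proved, stated in full; the proofs are below) =====
def Claim_equal_genCycleflag : Prop := ∀ (cl : List String) (seq : String), Dom_genCycleflag cl seq → Spec_genCycleflag cl seq (genCycleflag cl seq)

-- ===== LEMMAS AND PROOFS =====

-- the length-L window of seq starting at p (B's 'w'), as a named helper for the proofs
def winS (seq : String) (L p : Int) : String := PySem.Str.slice seq (some p) (some (p + L))

-- greedy non-overlapping count, structural on the haystack (mirrors CPython's str.count scan)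
def gcount (sub : List Char) : List Char → Nat
  | [] => 0
  | h :: t =>
    if sub.isPrefixOf (h :: t) then 1 + gcount sub (t.drop (sub.length - 1)) else gcount sub t
termination_by l => l.length
decreasing_by
  · simp only [List.length_drop, List.length_cons]; omega
  · simp only [List.length_cons]; omega

lemma count_go_eq (sub : List Char) (hsub : sub ≠ []) :
    ∀ (fuel : Nat) (l : List Char) (acc : Nat), l.length ≤ fuel →
      PySem.Chars.count.go sub fuel l acc = acc + gcount sub l := by
  obtain ⟨k, hk⟩ : ∃ k, sub.length = k + 1 := by
    cases sub with
    | nil => exact absurd rfl hsub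
    | cons a b => exact ⟨b.length, by simp⟩
  intro fuel
  induction fuel with
  | zero =>
    intro l acc hl
    have : l = [] := List.length_eq_zero_iff.mp (Nat.le_zero.mp hl)
    subst this
    rw [PySem.Chars.count.go.eq_def]; simp [gcount]
  | succ f ih =>
    intro l acc hl
    cases l with
    | nil => rw [PySem.Chars.count.go.eq_def]; simp [gcount]
    | cons h t =>
      rw [PySem.Chars.count.go.eq_def]
      simp only []
      rw [gcount]
      split_ifs with hp
      · have hdrop : List.drop sub.length (h :: t) = t.drop (sub.length - 1) := by
          rw [hk]; simp
        rw [hdrop, ih (t.drop (sub.length - 1)) (acc + 1)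
            (by simp only [List.length_drop]; simp at hl; omega)]
        omega
      · rw [ih t acc (by simp at hl; omega)]

lemma count_eq_gcount (s sub : List Char) (hsub : sub ≠ []) :
    PySem.Chars.count s sub = gcount sub s := by
  rw [PySem.Chars.count]
  have : sub.isEmpty = false := by
    cases sub with
    | nil => exact absurd rfl hsub
    | cons a b => rfl
  rw [this]
  simp only [Bool.false_eq_true, if_false]
  rw [count_go_eq sub hsub s.length s 0 (le_refl _)]
  omega

lemma one_le_gcount_iff (sub : List Char) (hsub : sub ≠ []) (l : List Char) :
    1 ≤ gcount sub l ↔ ∃ p, sub <+: l.drop p := by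
  fun_induction gcount sub l with
  | case1 =>
    simp only [List.drop_nil]
    constructor
    · omega
    · rintro ⟨p, hp⟩
      exact absurd (List.prefix_nil.mp hp) hsub
  | case2 h t hp ih =>
    constructor
    · intro _; exact ⟨0, by simpa using (List.isPrefixOf_iff_prefix.mp hp)⟩
    · intro _; omega
  | case3 h t hp ih =>
    rw [ih]
    constructor
    · rintro ⟨p, hpf⟩
      exact ⟨p + 1, by simpa using hpf⟩
    · rintro ⟨p, hpf⟩
      cases p with
      | zero =>
        simp only [List.drop_zero] at hpf
        exact absurd (List.isPrefixOf_iff_prefix.mpr hpf) hp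
      | succ p' => exact ⟨p', by simpa using hpf⟩

lemma two_le_gcount_iff (sub : List Char) (hsub : sub ≠ []) (l : List Char) :
    2 ≤ gcount sub l ↔
      ∃ p q, sub <+: l.drop p ∧ sub <+: l.drop q ∧ p + sub.length ≤ q := by
  fun_induction gcount sub l with
  | case1 =>
    simp only [List.drop_nil]
    constructor
    · omega
    · rintro ⟨p, q, hp, -, -⟩
      exact absurd (List.prefix_nil.mp hp) hsub
  | case2 h t hp ih =>
    have hrest : List.drop (sub.length - 1) t = List.drop sub.length (h :: t) := by
      obtain ⟨k, hk⟩ : ∃ k, sub.length = k + 1 := by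
        cases sub with
        | nil => exact absurd rfl hsub
        | cons a b => exact ⟨b.length, by simp⟩
      rw [hk]; simp
    have key := one_le_gcount_iff sub hsub (List.drop (sub.length - 1) t)
    constructor
    · intro h2
      obtain ⟨m, hm⟩ := key.mp (by omega)
      refine ⟨0, sub.length + m, ?_, ?_, by omega⟩
      · simpa using List.isPrefixOf_iff_prefix.mp hp
      · rw [hrest, List.drop_drop] at hm
        exact hm
    · rintro ⟨p, q, h1, h2, h3⟩
      have hq : sub.length ≤ q := by omega
      have : sub <+: List.drop (q - sub.length) (List.drop (sub.length - 1) t) := by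
        rw [hrest, List.drop_drop]
        have : sub.length + (q - sub.length) = q := by omega
        rw [this]
        exact h2
      have := key.mpr ⟨q - sub.length, this⟩
      omega
  | case3 h t hp ih =>
    rw [ih]
    constructor
    · rintro ⟨p, q, h1, h2, h3⟩
      exact ⟨p + 1, q + 1, by simpa using h1, by simpa using h2, by omega⟩
    · rintro ⟨p, q, h1, h2, h3⟩
      cases p with
      | zero =>
        simp only [List.drop_zero] at h1
        exact absurd (List.isPrefixOf_iff_prefix.mpr h1) hp
      | succ p' =>
        cases q with
        | zero => omega
        | succ q' =>
          exact ⟨p', q', by simpa using h1, by simpa using h2, by omega⟩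

lemma loopA_eq (seq : String) (l : List String) :
    genCycleflagLoop seq l = !(l.any fun r => decide (2 ≤ PySem.Str.count seq r)) := by
  induction l with
  | nil => rfl
  | cons r rest ih =>
    by_cases h : 2 ≤ PySem.Str.count seq r <;>
      · simp [genCycleflagLoop, ih]
        rfl

lemma rotation_slice_eq (cs : List Char) (k : Nat) (hk : k ≤ cs.length) :
    PySem.List.slice (cs ++ cs) (some (k : Int)) (some ((k : Int) + (cs.length : Int))) =
      cs.drop k ++ cs.take k := by
  rw [PySem.List.slice_natCast_add]
  rw [List.drop_append_of_le_length hk]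
  rw [List.take_append]
  have h1 : (cs.drop k).take cs.length = cs.drop k :=
    List.take_of_length_le (by simp)
  have h2 : cs.length - (cs.drop k).length = k := by
    simp only [List.length_drop]
    omega
  rw [h1, h2]

def rotC (cs : List Char) (k : Nat) : List Char := cs.drop k ++ cs.take k

lemma rhs_step (seq : String) (L : Int) (rotset : PySem.Set String) (S rest : List Int) (p : Int)
    (hnop : ∀ f, f ∈ S ++ p :: rest → f + L ≤ p → winS seq L f = winS seq L p →
      PySem.Set.contains rotset (winS seq L p) = true → False) :
    ((∃ f ∈ (S ++ [p]) ++ rest, ∃ q ∈ rest, f + L ≤ q ∧ winS seq L f = winS seq L q ∧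
        PySem.Set.contains rotset (winS seq L q) = true) ↔
      (∃ f ∈ S ++ p :: rest, ∃ q ∈ p :: rest, f + L ≤ q ∧ winS seq L f = winS seq L q ∧
        PySem.Set.contains rotset (winS seq L q) = true)) := by
  rw [← List.append_cons]
  constructor
  · rintro ⟨f, hf, q, hq, h⟩
    exact ⟨f, hf, q, List.mem_cons_of_mem _ hq, h⟩
  · rintro ⟨f, hf, q, hq, h1, h2, h3⟩
    rcases List.mem_cons.mp hq with rfl | hq'
    · exact (hnop f hf h1 h2 h3).elim
    · exact ⟨f, hf, q, hq', h1, h2, h3⟩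

-- the main loop of B, characterised: it returns false iff some window recurs at distance ≥ L
lemma loopB_char (seq : String) (L : Int) (rotset : PySem.Set String) (hL : 1 ≤ L) :
    ∀ (ps S : List Int) (first : PySem.Dict String Int),
      (S ++ ps).Pairwise (· < ·) →
      (∀ w f, first.get? w = some f →
        PySem.Set.contains rotset w = true ∧ f ∈ S ∧ winS seq L f = w ∧
          ∀ f' ∈ S, winS seq L f' = w → f ≤ f') →
      (∀ f ∈ S, PySem.Set.contains rotset (winS seq L f) = true →
        (first.get? (winS seq L f)).isSome = true) →
      (genCycleflagAltLoop seq L rotset ps first = false ↔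
        ∃ f ∈ S ++ ps, ∃ q ∈ ps, f + L ≤ q ∧ winS seq L f = winS seq L q ∧
          PySem.Set.contains rotset (winS seq L q) = true) := by
  intro ps
  induction ps with
  | nil =>
    intro S first _ _ _
    simp [genCycleflagAltLoop]
  | cons p rest ih =>
    intro S first hso inv1 inv2
    have hE : S ++ p :: rest = (S ++ [p]) ++ rest := (List.append_cons _ _ _)
    have hso' : ((S ++ [p]) ++ rest).Pairwise (· < ·) := by rw [← hE]; exact hso
    have hSp : ∀ s ∈ S, s < p := by
      rw [List.pairwise_append] at hso
      exact fun s hs => hso.2.2 s hs p (List.mem_cons_self)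
    have hpr : ∀ r ∈ rest, p < r := by
      rw [List.pairwise_append] at hso
      have := hso.2.1
      rw [List.pairwise_cons] at this
      exact this.1
    have hw : PySem.Str.slice seq (some p) (some (p + L)) = winS seq L p := rfl
    rw [genCycleflagAltLoop]
    simp only [hw]
    by_cases hcont : PySem.Set.contains rotset (winS seq L p) = true
    · rw [if_pos hcont]
      cases hget : first.get? (winS seq L p) with
      | some f =>
        obtain ⟨hcw, hfS, hwf, hmin⟩ := inv1 _ _ hget
        dsimp only
        by_cases hLe : L ≤ p - f
        · rw [if_pos hLe]
          constructor
          · intro _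
            exact ⟨f, List.mem_append_left _ hfS, p, List.mem_cons_self, by omega, hwf, hcont⟩
          · intro _; rfl
        · rw [if_neg hLe]
          rw [ih (S ++ [p]) first hso' ?_ ?_]
          · apply rhs_step
            intro f' hf' h1 h2 _
            have hf'S : f' ∈ S := by
              rcases List.mem_append.mp hf' with h | h
              · exact h
              · rcases List.mem_cons.mp h with rfl | h'
                · omega
                · have := hpr f' h'; omega
            have := hmin f' hf'S h2
            omega
          · intro w g hg
            obtain ⟨h1, h2, h3, h4⟩ := inv1 w g hg
            refine ⟨h1, List.mem_append_left _ h2, h3, ?_⟩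
            intro f' hf' hwf'
            rcases List.mem_append.mp hf' with h | h
            · exact h4 f' h hwf'
            · rcases List.mem_singleton.mp h with rfl
              have := hSp g h2; omega
          · intro g hg hcg
            rcases List.mem_append.mp hg with h | h
            · exact inv2 g h hcg
            · rcases List.mem_singleton.mp h with rfl
              rw [hget]; rfl
      | none =>
        dsimp only
        rw [ih (S ++ [p]) (first.insert (winS seq L p) p) hso' ?_ ?_]
        · apply rhs_step
          intro f' hf' h1 h2 hc3
          have hf'S : f' ∈ S := by
            rcases List.mem_append.mp hf' with h | h
            · exact h
            · rcases List.mem_cons.mp h with rfl | h'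
              · omega
              · have := hpr f' h'; omega
          have := inv2 f' hf'S (by rw [h2]; exact hc3)
          rw [h2, hget] at this
          simp at this
        · intro w g hg
          rw [PySem.Dict.get?_insert] at hg
          by_cases hww : w = winS seq L p
          · subst hww
            rw [if_pos rfl] at hg
            obtain rfl : g = p := by simpa using hg.symm
            refine ⟨hcont, List.mem_append_right _ (List.mem_singleton.mpr rfl), rfl, ?_⟩
            intro f' hf' hwf'
            rcases List.mem_append.mp hf' with h | h
            · have := inv2 f' h (by rw [hwf']; exact hcont)
              rw [hwf', hget] at this
              simp at this
            · rcases List.mem_singleton.mp h with rfl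
              omega
          · rw [if_neg hww] at hg
            obtain ⟨h1, h2, h3, h4⟩ := inv1 w g hg
            refine ⟨h1, List.mem_append_left _ h2, h3, ?_⟩
            intro f' hf' hwf'
            rcases List.mem_append.mp hf' with h | h
            · exact h4 f' h hwf'
            · rcases List.mem_singleton.mp h with rfl
              exact absurd hwf'.symm hww
        · intro g hg hcg
          rw [PySem.Dict.get?_insert]
          by_cases hww : winS seq L g = winS seq L p
          · rw [hww, if_pos rfl]; rfl
          · rw [if_neg hww]
            rcases List.mem_append.mp hg with h | h
            · exact inv2 g h hcg
            · rcases List.mem_singleton.mp h with rfl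
              exact absurd rfl hww
    · rw [if_neg hcont]
      rw [ih (S ++ [p]) first hso' ?_ ?_]
      · apply rhs_step
        intro f' _ _ _ hc3
        exact hcont hc3
      · intro w g hg
        obtain ⟨h1, h2, h3, h4⟩ := inv1 w g hg
        refine ⟨h1, List.mem_append_left _ h2, h3, ?_⟩
        intro f' hf' hwf'
        rcases List.mem_append.mp hf' with h | h
        · exact h4 f' h hwf'
        · rcases List.mem_singleton.mp h with rfl
          rw [hwf'] at hcont
          exact absurd h1 hcont
      · intro g hg hcg
        rcases List.mem_append.mp hg with h | h
        · exact inv2 g h hcg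
        · rcases List.mem_singleton.mp h with rfl
          exact absurd hcg hcont

-- occurrence at a position, stated through take
lemma occ_iff (s w : List Char) (n k : Nat) (hn : 1 ≤ n) (hw : w.length = n) :
    w <+: s.drop k ↔ ((s.drop k).take n = w ∧ k + n ≤ s.length) := by
  constructor
  · intro h
    have hl := h.length_le
    simp only [List.length_drop] at hl
    refine ⟨?_, by omega⟩
    have := List.prefix_iff_eq_take.mp h
    rw [hw] at this
    exact this.symm
  · rintro ⟨h1, h2⟩
    rw [← h1]
    exact List.take_prefix _ _

lemma rotC_length (cs : List Char) (k : Nat) (hk : k ≤ cs.length) :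
    (rotC cs k).length = cs.length := by
  simp [rotC]; omega

lemma rotA_toList (c : String) (k : Nat) :
    (PySem.Str.slice c (some (k : Int)) none ++ PySem.Str.slice c none (some (k : Int))).toList
      = rotC c.toList k := by
  rw [String.toList_append, PySem.Str.toList_slice, PySem.Str.toList_slice,
    PySem.Chars.slice_eq_listSlice, PySem.Chars.slice_eq_listSlice,
    PySem.List.slice_from_natCast, PySem.List.slice_to_natCast]
  rfl

lemma rotB_toList (c : String) (k : Nat) (hk : k ≤ c.toList.length) :
    (PySem.Str.slice (c ++ c) (some (k : Int)) (some ((k : Int) + (c.toList.length : Int)))).toList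
      = rotC c.toList k := by
  rw [PySem.Str.toList_slice, PySem.Chars.slice_eq_listSlice, String.toList_append,
    rotation_slice_eq c.toList k hk]
  rfl

lemma winS_toList (seq : String) (n k : Nat) :
    (winS seq (n : Int) (k : Int)).toList = (seq.toList.drop k).take n := by
  rw [winS, PySem.Str.toList_slice, PySem.Chars.slice_eq_listSlice,
    PySem.List.slice_natCast_add]

lemma main_ne (c seq : String) (h0 : PySem.Str.len c ≠ 0) :
    genCycleflagLoop seq ((PySem.List.pyRange 0 (PySem.Str.len c) 1).map
      (fun i => PySem.Str.slice c (some i) none ++ PySem.Str.slice c none (some i))) =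
    genCycleflagAltLoop seq (PySem.Str.len c)
      (PySem.Set.ofList ((PySem.List.pyRange 0 (PySem.Str.len c) 1).map
        (fun i => PySem.Str.slice (c ++ c) (some i) (some (i + PySem.Str.len c)))))
      (PySem.List.pyRange 0 (PySem.Str.len seq - PySem.Str.len c + 1) 1) PySem.Dict.empty := by
  have hlen : PySem.Str.len c = (c.toList.length : Int) := PySem.Str.len_eq c
  have hlens : PySem.Str.len seq = (seq.toList.length : Int) := PySem.Str.len_eq seq
  rw [hlen, hlens]
  set n : Nat := c.toList.length with hn
  have hn1 : 1 ≤ n := by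
    rcases Nat.eq_zero_or_pos n with h | h
    · exact absurd (by rw [hlen]; exact_mod_cast h) h0
    · exact h
  have hrotne : ∀ k : Nat, k ≤ n → rotC c.toList k ≠ [] := by
    intro k hk hnil
    have h2 := rotC_length c.toList k hk
    rw [hnil] at h2
    simp only [List.length_nil] at h2
    omega
  have hmemof : ∀ (l : List String) (x : String),
      PySem.Set.contains (PySem.Set.ofList l) x = true ↔ x ∈ l := by
    intro l x; simp [PySem.Set.contains]
  -- membership in the rotation set, characterised through toList
  have hcontains : ∀ w : String,
      PySem.Set.contains (PySem.Set.ofList ((PySem.List.pyRange 0 (n : Int) 1).map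
        (fun i => PySem.Str.slice (c ++ c) (some i) (some (i + (n : Int)))))) w = true ↔
      ∃ k : Nat, k < n ∧ w.toList = rotC c.toList k := by
    intro w
    rw [hmemof, List.mem_map]
    constructor
    · rintro ⟨i, hi, rfl⟩
      obtain ⟨h0i, hin⟩ := PySem.List.mem_pyRange_one.mp hi
      refine ⟨i.toNat, by omega, ?_⟩
      have hi' : ((i.toNat : Nat) : Int) = i := by omega
      have h' := rotB_toList c i.toNat (by omega)
      rw [hi', ← hn] at h'
      exact h'
    · rintro ⟨k, hk, hwk⟩
      refine ⟨(k : Int), PySem.List.mem_pyRange_one.mpr ⟨by omega, by omega⟩, ?_⟩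
      have h' := rotB_toList c k (by omega)
      rw [← hn] at h'
      apply String.toList_inj.mp
      rw [hwk, h']
  -- A'seq.toList loop, characterised
  have hcntA : ∀ k : Nat, k ≤ n → PySem.Str.count seq
      (PySem.Str.slice c (some ((k : Nat) : Int)) none ++
        PySem.Str.slice c none (some ((k : Nat) : Int))) = gcount (rotC c.toList k) seq.toList := by
    intro k hk
    rw [(show PySem.Str.count seq
      (PySem.Str.slice c (some ((k : Nat) : Int)) none ++
        PySem.Str.slice c none (some ((k : Nat) : Int))) = PySem.Chars.count seq.toList
      (PySem.Str.slice c (some ((k : Nat) : Int)) none ++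
        PySem.Str.slice c none (some ((k : Nat) : Int))).toList from rfl), rotA_toList,
      count_eq_gcount _ _ (hrotne k hk)]
  have hA : (genCycleflagLoop seq ((PySem.List.pyRange 0 (n : Int) 1).map
      (fun i => PySem.Str.slice c (some i) none ++ PySem.Str.slice c none (some i))) = false) ↔
      ∃ k : Nat, k < n ∧ 2 ≤ gcount (rotC c.toList k) seq.toList := by
    rw [loopA_eq]
    simp only [Bool.not_eq_false', List.any_map, List.any_eq_true, decide_eq_true_eq,
      Function.comp_apply]
    constructor
    · rintro ⟨i, hi, hcnt⟩
      obtain ⟨h0i, hin⟩ := PySem.List.mem_pyRange_one.mp hi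
      refine ⟨i.toNat, by omega, ?_⟩
      have hi' : ((i.toNat : Nat) : Int) = i := by omega
      rw [← hi'] at hcnt
      rwa [hcntA i.toNat (by omega)] at hcnt
    · rintro ⟨k, hk, hcnt⟩
      refine ⟨(k : Int), PySem.List.mem_pyRange_one.mpr ⟨by omega, by omega⟩, ?_⟩
      rw [hcntA k (by omega)]
      exact hcnt
  -- B'seq.toList loop, characterised
  have hB : (genCycleflagAltLoop seq (n : Int)
      (PySem.Set.ofList ((PySem.List.pyRange 0 (n : Int) 1).map
        (fun i => PySem.Str.slice (c ++ c) (some i) (some (i + (n : Int))))))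
      (PySem.List.pyRange 0 ((seq.toList.length : Int) - (n : Int) + 1) 1) PySem.Dict.empty = false) ↔
      ∃ f ∈ PySem.List.pyRange 0 ((seq.toList.length : Int) - (n : Int) + 1) 1,
        ∃ q ∈ PySem.List.pyRange 0 ((seq.toList.length : Int) - (n : Int) + 1) 1,
          f + (n : Int) ≤ q ∧ winS seq (n : Int) f = winS seq (n : Int) q ∧
          PySem.Set.contains (PySem.Set.ofList ((PySem.List.pyRange 0 (n : Int) 1).map
            (fun i => PySem.Str.slice (c ++ c) (some i) (some (i + (n : Int))))))
            (winS seq (n : Int) q) = true := by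
    rw [loopB_char seq (n : Int) _ (by omega) _ [] PySem.Dict.empty
      (by simpa using PySem.List.pairwise_lt_pyRange_one 0 ((seq.toList.length : Int) - (n : Int) + 1))
      (by intro w f h; rw [PySem.Dict.get?_empty] at h; cases h)
      (by intro f hf; cases hf)]
    simp only [List.nil_append]
  -- bridge the two characterisations
  have key : (∃ k : Nat, k < n ∧ 2 ≤ gcount (rotC c.toList k) seq.toList) ↔
      (∃ f ∈ PySem.List.pyRange 0 ((seq.toList.length : Int) - (n : Int) + 1) 1,
        ∃ q ∈ PySem.List.pyRange 0 ((seq.toList.length : Int) - (n : Int) + 1) 1,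
          f + (n : Int) ≤ q ∧ winS seq (n : Int) f = winS seq (n : Int) q ∧
          PySem.Set.contains (PySem.Set.ofList ((PySem.List.pyRange 0 (n : Int) 1).map
            (fun i => PySem.Str.slice (c ++ c) (some i) (some (i + (n : Int))))))
            (winS seq (n : Int) q) = true) := by
    constructor
    · rintro ⟨k, hk, hcnt⟩
      obtain ⟨p, q, hp, hq, hpq⟩ := (two_le_gcount_iff _ (hrotne k (by omega)) seq.toList).mp hcnt
      rw [rotC_length c.toList k (by omega)] at hpq
      obtain ⟨hp1, hp2⟩ := (occ_iff seq.toList _ n p hn1 (rotC_length c.toList k (by omega))).mp hp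
      obtain ⟨hq1, hq2⟩ := (occ_iff seq.toList _ n q hn1 (rotC_length c.toList k (by omega))).mp hq
      refine ⟨(p : Int), PySem.List.mem_pyRange_one.mpr ⟨by omega, by omega⟩,
        (q : Int), PySem.List.mem_pyRange_one.mpr ⟨by omega, by omega⟩, by omega, ?_, ?_⟩
      · apply String.toList_inj.mp
        rw [winS_toList, winS_toList, hp1, hq1]
      · rw [hcontains]
        exact ⟨k, hk, by rw [winS_toList]; exact hq1⟩
    · rintro ⟨f, hf, q, hq, hfq, heq, hcnt⟩
      obtain ⟨hf0, hfN⟩ := PySem.List.mem_pyRange_one.mp hf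
      obtain ⟨hq0, hqN⟩ := PySem.List.mem_pyRange_one.mp hq
      obtain ⟨k, hk, hwk⟩ := (hcontains _).mp hcnt
      refine ⟨k, hk, ?_⟩
      rw [two_le_gcount_iff _ (hrotne k (by omega)) seq.toList]
      have hfi : ((f.toNat : Nat) : Int) = f := by omega
      have hqi : ((q.toNat : Nat) : Int) = q := by omega
      rw [← hqi, winS_toList] at hwk
      have hq2 : q.toNat + n ≤ seq.toList.length := by omega
      have heq' : (seq.toList.drop f.toNat).take n = rotC c.toList k := by
        have := congrArg String.toList heq
        rw [← hfi, ← hqi, winS_toList, winS_toList] at this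
        rw [this, hwk]
      refine ⟨f.toNat, q.toNat, ?_, ?_, ?_⟩
      · exact (occ_iff seq.toList _ n f.toNat hn1 (rotC_length c.toList k (by omega))).mpr ⟨heq', by omega⟩
      · exact (occ_iff seq.toList _ n q.toNat hn1 (rotC_length c.toList k (by omega))).mpr ⟨hwk, hq2⟩
      · rw [rotC_length c.toList k (by omega)]; omega
  have hiff := hA.trans (key.trans hB.symm)
  cases h1 : genCycleflagLoop seq ((PySem.List.pyRange 0 (n : Int) 1).map
      (fun i => PySem.Str.slice c (some i) none ++ PySem.Str.slice c none (some i))) <;>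
    cases h2 : genCycleflagAltLoop seq (n : Int)
      (PySem.Set.ofList ((PySem.List.pyRange 0 (n : Int) 1).map
        (fun i => PySem.Str.slice (c ++ c) (some i) (some (i + (n : Int))))))
      (PySem.List.pyRange 0 ((seq.toList.length : Int) - (n : Int) + 1) 1) PySem.Dict.empty <;>
    simp_all

-- ===== VERDICT (by name: the statement is the Claim_ definition above) =====
theorem genCycleflag_spec : Claim_equal_genCycleflag := by
  intro cl seq _
  unfold Spec_genCycleflag genCycleflag genCycleflag_alt
  dsimp only
  by_cases h0 : PySem.Str.len (PySem.Str.slice (PySem.Str.join "" cl) none (some (-1))) = 0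
  · rw [if_pos h0, h0, PySem.List.pyRange_one_eq_nil (le_refl 0)]
    rfl
  · rw [if_neg h0]
    exact main_ne _ seq h0
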